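-- pv_equiv track=rewrite | github.com/LeiZhen0667/FirmID | FIMCTS-vs-ARGUS.py | filter_identical_rows
-- ===== SOURCE A (Python) =====
-- from typing import Dict, Set, List, Tuple, Optional
--
-- def filter_identical_rows(feature_table: Dict[str, Dict[str, bool]],
--                           remaining_versions: Set[str]) -> Dict[str, Dict[str, bool]]:
--     """
--     Filter out file rows that can't distinguish between remaining versions
--
--     Args:
--         feature_table: Current feature table
--         remaining_versions: Set of remaining versions to distinguish
--
--     Returns:
--         Filtered feature table
--     """
--     filtered_table = {}
--     for file, features in feature_table.items():
--         # Check if file existence is consistent across all remaining versions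
--         values = set()
--         for ver in remaining_versions:
--             values.add(features[ver])
--
--         # Only keep files that can distinguish versions (existence varies)
--         if len(values) > 1:
--             filtered_table[file] = features
--
--     return filtered_table
-- ===== SOURCE B (Python) =====
-- from typing import Dict, Set, List, Tuple, Optional
--
-- def filter_identical_rows(feature_table: Dict[str, Dict[str, bool]],
--                           remaining_versions: Set[str]) -> Dict[str, Dict[str, bool]]:
--     """Version-major sweep: for each version take the column of existence values
--     and fold it into per-row (seen_true, all_true) accumulators; a row
--     distinguishes versions iff in the end it has seen a True but not only Trues."""
--     rows = list(feature_table.items())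
--     state = [(False, True)] * len(rows)
--     for ver in remaining_versions:
--         column = [features[ver] for _, features in rows]
--         state = [(seen or v, allv and v)
--                  for (seen, allv), v in zip(state, column)]
--     return {file: features
--             for (file, features), (seen, allv) in zip(rows, state)
--             if seen and not allv}
-- ===== Notes on version B (the rewrite author's own statement) =====
-- stated objective: alternative
-- what changed: Transposes the traversal: instead of building a value set per row, B sweeps version-major, maintaining a parallel list of (seen_true, all_true) accumulators updated once per version, and a final staged pass filters the rows by that state.
import Mathlib
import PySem

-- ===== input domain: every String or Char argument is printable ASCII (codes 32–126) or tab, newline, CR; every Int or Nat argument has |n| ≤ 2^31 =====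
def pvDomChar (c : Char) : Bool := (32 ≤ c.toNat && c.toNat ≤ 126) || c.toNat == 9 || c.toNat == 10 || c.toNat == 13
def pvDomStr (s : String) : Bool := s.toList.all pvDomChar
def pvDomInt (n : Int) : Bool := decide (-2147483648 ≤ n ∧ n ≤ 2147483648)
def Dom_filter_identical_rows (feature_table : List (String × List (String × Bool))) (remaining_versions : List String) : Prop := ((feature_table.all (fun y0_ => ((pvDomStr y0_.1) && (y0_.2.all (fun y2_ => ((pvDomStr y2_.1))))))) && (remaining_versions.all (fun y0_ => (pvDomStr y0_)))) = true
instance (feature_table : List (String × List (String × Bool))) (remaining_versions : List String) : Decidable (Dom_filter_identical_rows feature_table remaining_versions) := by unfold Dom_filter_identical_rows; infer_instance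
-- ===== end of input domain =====

-- B transposes A's traversal: a version-major sweep over parallel (seen_true, all_true) accumulators,
-- then a staged filtering pass, instead of A's per-row value-set; objective: alternative.

-- ===== PORT A =====
-- A builds, for each file row, the set of existence values over remaining_versions and keeps the row iff the set has more than one element.
def filter_identical_rows (feature_table : List (String × List (String × Bool))) (remaining_versions : List String) : List (String × List (String × Bool)) :=
  feature_table.foldl (fun filtered_table p =>
    let values : PySem.Set Bool :=
      remaining_versions.foldl (fun s ver => PySem.Set.add s ((p.2.lookup ver).getD false)) PySem.Set.empty
    if 1 < values.length then filtered_table ++ [p] else filtered_table) []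

-- ===== PORT B =====
-- B: version-major sweep: per version, the column of values is folded into parallel (seen_true, all_true) pairs; a final pass filters by that state.
def filter_identical_rows_alt (feature_table : List (String × List (String × Bool))) (remaining_versions : List String) : List (String × List (String × Bool)) :=
  let state0 : List (Bool × Bool) := List.replicate feature_table.length (false, true)
  let state := remaining_versions.foldl (fun state ver =>
    let column := feature_table.map (fun p => (p.2.lookup ver).getD false)
    (state.zip column).map (fun q => (q.1.1 || q.2, q.1.2 && q.2))) state0
  ((feature_table.zip state).filter (fun q => q.2.1 && !q.2.2)).map (fun q => q.1)

-- ===== PRECONDITION & SPEC =====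
-- Pre_ excludes exactly the inputs where Python raises KeyError: some remaining version missing from some row's dict.
def Pre_filter_identical_rows (feature_table : List (String × List (String × Bool))) (remaining_versions : List String) : Prop :=
  ∀ p ∈ feature_table, ∀ ver ∈ remaining_versions, ((p.2.lookup ver).isSome : Prop)
instance (feature_table : List (String × List (String × Bool))) (remaining_versions : List String) : Decidable (Pre_filter_identical_rows feature_table remaining_versions) := by unfold Pre_filter_identical_rows; infer_instance
def pvWitness_filter_identical_rows : (List (String × List (String × Bool))) × List String :=
  ([("a.so", [("v1", true), ("v2", false)]), ("b.so", [("v1", true), ("v2", true)])], ["v1", "v2"])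
def Spec_filter_identical_rows (feature_table : List (String × List (String × Bool))) (remaining_versions : List String) (out : List (String × List (String × Bool))) : Prop := out = filter_identical_rows_alt feature_table remaining_versions
instance (feature_table : List (String × List (String × Bool))) (remaining_versions : List String) (out : List (String × List (String × Bool))) : Decidable (Spec_filter_identical_rows feature_table remaining_versions out) := by unfold Spec_filter_identical_rows; infer_instance

-- ===== CLAIM (what is proved, stated in full; the proofs are below) =====
def Claim_equal_filter_identical_rows : Prop := ∀ (feature_table : List (String × List (String × Bool))) (remaining_versions : List String), Dom_filter_identical_rows feature_table remaining_versions → Pre_filter_identical_rows feature_table remaining_versions → Spec_filter_identical_rows feature_table remaining_versions (filter_identical_rows feature_table remaining_versions)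

-- ===== LEMMAS AND PROOFS =====

-- zipping a mapped copy of a list with the list itself
theorem pv_zip_map_self {A C : Type} (g : A -> C) (ft : List A) :
    (ft.map g).zip ft = ft.map (fun p => (g p, p)) := by
  induction ft with
  | nil => rfl
  | cons a l ihl => simp [ihl]

-- zipping a list with a mapped copy of itself
theorem pv_zip_map_self' {A C : Type} (g : A -> C) (ft : List A) :
    ft.zip (ft.map g) = ft.map (fun p => (p, g p)) := by
  induction ft with
  | nil => rfl
  | cons a l ihl => simp [ihl]

-- zipping with a mapped column is mapping over the zip
theorem pv_zip_map_col {A B C D : Type} (F : B × C -> D) (g : A -> C) :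
    ∀ (st : List B) (ft : List A),
      ((st.zip (ft.map g)).map F) = (st.zip ft).map (fun q => F (q.1, g q.2)) := by
  intro st
  induction st with
  | nil => intro ft; rfl
  | cons b sl ih =>
    intro ft
    cases ft with
    | nil => rfl
    | cons a fl => simp [ih]

-- the version-major fold over a state of shape ft.map g is the pointwise per-row fold
theorem pv_fold_transpose {α β γ : Type} (rv : List β) (ft : List α) (g : α → γ)
    (f : γ → α → β → γ) :
    rv.foldl (fun st ver => (st.zip ft).map (fun q => f q.1 q.2 ver)) (ft.map g)
      = ft.map (fun p => rv.foldl (fun c ver => f c p ver) (g p)) := by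
  induction rv generalizing g with
  | nil => rfl
  | cons v t ih =>
    simp only [List.foldl_cons]
    rw [pv_zip_map_self, List.map_map]
    exact ih (fun p => f (g p) p v)

-- the per-row accumulator computes (any, all) of the row's values over rv
theorem pv_row_fold (rv : List String) (feats : List (String × Bool)) (a b : Bool) :
    rv.foldl (fun c ver => (c.1 || ((feats.lookup ver).getD false),
                            c.2 && ((feats.lookup ver).getD false))) (a, b)
      = (a || rv.any (fun ver => (feats.lookup ver).getD false),
         b && rv.all (fun ver => (feats.lookup ver).getD false)) := by
  induction rv generalizing a b with
  | nil => simp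
  | cons v t ih => simp [ih, Bool.or_assoc, Bool.and_assoc]

-- a Nodup list of Bools has length > 1 iff it contains both truth values
theorem pv_nodup_bool_len (l : List Bool) (h : l.Nodup) :
    1 < l.length ↔ (true ∈ l ∧ false ∈ l) := by
  match l with
  | [] => simp
  | [a] => cases a <;> simp
  | a :: b :: t =>
    have hab : a ≠ b := by
      have := h
      simp [List.nodup_cons] at this
      exact fun e => this.1.1 (e ▸ rfl)
    constructor
    · intro _
      cases a <;> cases b <;> simp_all
    · intro _; simp

-- the per-row condition of A equals B's (some True ∧ not all True)
theorem pv_row_cond (feats : List (String × Bool)) (rv : List String) :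
    (1 < (rv.foldl (fun s ver => PySem.Set.add s ((feats.lookup ver).getD false)) PySem.Set.empty).length)
      ↔ ((rv.any (fun ver => (feats.lookup ver).getD false)
            && !(rv.all (fun ver => (feats.lookup ver).getD false))) = true) := by
  rw [← PySem.Set.update_map_eq_foldl_add, PySem.Set.update_empty]
  rw [pv_nodup_bool_len _ (PySem.Set.nodup_ofList _)]
  simp only [PySem.Set.mem_ofList, List.mem_map]
  simp only [Bool.and_eq_true, Bool.not_eq_true', List.any_eq_true, List.all_eq_false]
  constructor <;>
    (rintro ⟨⟨v1, hv1, e1⟩, ⟨v2, hv2, e2⟩⟩;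
     exact ⟨⟨v1, hv1, by simp_all⟩, ⟨v2, hv2, by simp_all⟩⟩)

-- ===== VERDICT (by name: the statement is the Claim_ definition above) =====
theorem filter_identical_rows_spec : Claim_equal_filter_identical_rows := by
  intro ft rv _ _
  unfold Spec_filter_identical_rows filter_identical_rows filter_identical_rows_alt
  -- A's side: append-if fold is a filter
  have hA := PySem.List.foldl_append_if
      (fun p : String × List (String × Bool) =>
        decide (1 < (rv.foldl (fun s ver => PySem.Set.add s ((p.2.lookup ver).getD false)) PySem.Set.empty).length))
      id ft []
  simp only [id_eq, List.map_id, List.nil_append, decide_eq_true_eq] at hA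
  dsimp only
  rw [hA]
  -- B's side: reduce the transposed fold to a per-row map, then the zip-filter-map to a filter
  have hrep : List.replicate ft.length ((false, true) : Bool × Bool)
      = ft.map (fun _ => (false, true)) := by
    simp [List.map_const']
  have hfun : (fun (state : List (Bool × Bool)) (ver : String) =>
        (state.zip (ft.map (fun p => (p.2.lookup ver).getD false))).map
          (fun q => (q.1.1 || q.2, q.1.2 && q.2)))
      = (fun (state : List (Bool × Bool)) (ver : String) =>
        (state.zip ft).map (fun q =>
          (q.1.1 || ((q.2.2.lookup ver).getD false), q.1.2 && ((q.2.2.lookup ver).getD false)))) := by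
    funext st ver
    exact pv_zip_map_col (fun q => (q.1.1 || q.2, q.1.2 && q.2)) (fun p => (p.2.lookup ver).getD false) st ft
  rw [hrep, hfun, pv_fold_transpose rv ft (fun _ => ((false, true) : Bool × Bool))
        (fun c p ver => (c.1 || ((p.2.lookup ver).getD false), c.2 && ((p.2.lookup ver).getD false)))]
  simp only [pv_row_fold, Bool.false_or, Bool.true_and]
  rw [pv_zip_map_self', List.filter_map, List.map_map]
  simp only [Function.comp_def, List.map_id']
  apply List.filter_congr
  intro p _
  rw [Bool.eq_iff_iff]
  simp only [decide_eq_true_eq]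
  exact pv_row_cond p.2 rv
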